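-- pv_equiv track=rewrite | github.com/Hegemony/Leetcode-Practice | 剑指 Offer/58-2. reverseLeftWords.py | reverseLeftWords
-- ===== SOURCE A (Python) =====
-- def reverseLeftWords(s: str, n: int) -> str:
--     l, r = 0, 0
--     res1 = []
--     res2 = []
--     for i in range(len(s)):
--         if r < n:
--             res1.append(s[i])
--             r += 1
--         else:
--             res2.append(s[i])
--     return ''.join(res2 + res1)
-- ===== SOURCE B (Python) =====
-- def reverseLeftWords(s: str, n: int) -> str:
--     k = max(0, min(n, len(s)))
--     return s[k:] + s[:k]
-- ===== Notes on version B (the rewrite author's own statement) =====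
-- stated objective: simpler
-- what changed: Replaces the per-character partition loop building two lists with a closed-form clamped slice: k = max(0, min(n, len(s))); return s[k:] + s[:k].
import Mathlib
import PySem

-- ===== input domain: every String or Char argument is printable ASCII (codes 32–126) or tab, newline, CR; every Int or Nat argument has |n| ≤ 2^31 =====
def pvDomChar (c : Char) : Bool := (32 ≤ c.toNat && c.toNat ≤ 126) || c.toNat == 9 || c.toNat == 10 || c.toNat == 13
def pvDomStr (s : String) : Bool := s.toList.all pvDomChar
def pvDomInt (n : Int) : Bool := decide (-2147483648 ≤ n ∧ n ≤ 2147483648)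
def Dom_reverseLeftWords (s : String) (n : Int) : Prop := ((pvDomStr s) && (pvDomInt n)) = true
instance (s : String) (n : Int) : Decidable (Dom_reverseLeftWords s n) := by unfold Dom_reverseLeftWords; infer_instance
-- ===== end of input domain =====

-- B replaces A's per-character partition loop with a closed-form clamped slice (simpler).

-- ===== PORT A =====
-- A's loop over range(len(s)) indexing s[i]: ported as a fold over the characters
-- in order, carrying the same state (r, res1, res2); (l is dead in A).
def reverseLeftWords (s : String) (n : Int) : String :=
  let st := s.toList.foldl
    (fun (st : Int × List Char × List Char) c =>
      if st.1 < n then (st.1 + 1, st.2.1 ++ [c], st.2.2)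
      else (st.1, st.2.1, st.2.2 ++ [c]))
    (0, [], [])
  String.ofList (st.2.2 ++ st.2.1)

-- ===== PORT B =====
def reverseLeftWords_alt (s : String) (n : Int) : String :=
  let cs := s.toList
  let k : Int := max 0 (min n (cs.length : Int))
  String.ofList (PySem.List.slice cs (some k) none ++ PySem.List.slice cs none (some k))

-- ===== PRECONDITION & SPEC =====
def Spec_reverseLeftWords (s : String) (n : Int) (out : String) : Prop := out = reverseLeftWords_alt s n
instance (s : String) (n : Int) (out : String) : Decidable (Spec_reverseLeftWords s n out) := by unfold Spec_reverseLeftWords; infer_instance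

-- ===== CLAIM (what is proved, stated in full; the proofs are below) =====
def Claim_equal_reverseLeftWords : Prop := ∀ (s : String) (n : Int), Dom_reverseLeftWords s n → Spec_reverseLeftWords s n (reverseLeftWords s n)

-- ===== LEMMAS AND PROOFS =====

-- The partition fold splits the list at (n - r).toNat, relative to the accumulators.
theorem reverseLeftWords_fold_inv (n : Int) (cs : List Char) : ∀ (r : Int) (a b : List Char),
    (cs.foldl
      (fun (st : Int × List Char × List Char) c =>
        if st.1 < n then (st.1 + 1, st.2.1 ++ [c], st.2.2)
        else (st.1, st.2.1, st.2.2 ++ [c]))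
      (r, a, b)).2
    = (a ++ cs.take (n - r).toNat, b ++ cs.drop (n - r).toNat) := by
  induction cs with
  | nil => intro r a b; simp
  | cons c cs ih =>
    intro r a b
    simp only [List.foldl_cons]
    by_cases h : r < n
    · have ht : (n - r).toNat = (n - (r + 1)).toNat + 1 := by omega
      simp [h, ih (r + 1) (a ++ [c]) b, ht]
    · have ht : (n - r).toNat = 0 := by omega
      simp [h, ih r a (b ++ [c]), ht]

-- ===== VERDICT (by name: the statement is the Claim_ definition above) =====
theorem reverseLeftWords_spec : Claim_equal_reverseLeftWords := by
  intro s n _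
  unfold Spec_reverseLeftWords reverseLeftWords reverseLeftWords_alt
  simp only [reverseLeftWords_fold_inv n s.toList 0 [] []]
  set cs := s.toList with hcs
  have hk : (0 : Int) ≤ max 0 (min n (cs.length : Int)) := le_max_left _ _
  rw [PySem.List.slice_from cs hk, PySem.List.slice_to cs hk]
  have hkn : (max 0 (min n (cs.length : Int))).toNat = min n.toNat cs.length := by omega
  rw [hkn]
  by_cases h : n.toNat ≤ cs.length
  · have : min n.toNat cs.length = n.toNat := by omega
    simp [this]
  · have h1 : min n.toNat cs.length = cs.length := by omega
    have h2 : cs.length ≤ n.toNat := by omega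
    simp [h1, List.take_of_length_le h2, List.drop_eq_nil_of_le h2]
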